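-- pv_equiv track=rewrite | github.com/jorenvandeweyer/adventofcode | 2019/22.py | shuffleReverse
-- ===== SOURCE A (Python) =====
-- def shuffleReverse(instrs, size, index):
--     a=1
--     b=0
--
--     for instr in reversed(list(instrs)):
--         instr_p = instr.split(' ')
--         if instr == 'deal into new stack':
--             b += 1
--             a *= -1
--             b *= -1
--         elif instr_p[0] == 'cut':
--             n = int(instr_p[1])
--             b += n
--         elif instr_p[0] == 'deal':
--             incr = int(instr_p[3])
--             p = pow(incr, size-2, size)
--             a *= p
--             b *= p
--
--     return (a%size, b%size)
-- ===== SOURCE B (Python) =====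
-- def _parse(instr, size):
--     # map one instruction to a compact opcode, or None if it matches nothing
--     w = instr.split(' ')
--     if instr == 'deal into new stack':
--         return ('s', 0)
--     elif w[0] == 'cut':
--         return ('c', int(w[1]))
--     elif w[0] == 'deal':
--         return ('d', pow(int(w[3]), size - 2, size))
--     return None
--
--
-- def shuffleReverse(instrs, size, index):
--     # Staged: parse instructions into opcodes first, then fold the affine map
--     # forwards over the opcodes, reducing a and b modulo size at every step.
--     ops = [op for op in (_parse(i, size) for i in instrs) if op is not None]
--     a, b = 1, 0
--     for t, n in ops:
--         if t == 's':
--             a, b = (-a) % size, (b - a) % size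
--         elif t == 'c':
--             b = (b + a * n) % size
--         else:
--             a = a * n % size
--     return (a % size, b % size)
-- ===== Notes on version B (the rewrite author's own statement) =====
-- stated objective: alternative
-- what changed: B first parses the instructions into a list of compact opcodes (stack/cut n/deal p with p precomputed), then folds the inverse affine map forwards over the opcodes reducing a and b modulo size at each step, instead of A's single backwards string-matching loop with unreduced bignums.
import Mathlib
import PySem

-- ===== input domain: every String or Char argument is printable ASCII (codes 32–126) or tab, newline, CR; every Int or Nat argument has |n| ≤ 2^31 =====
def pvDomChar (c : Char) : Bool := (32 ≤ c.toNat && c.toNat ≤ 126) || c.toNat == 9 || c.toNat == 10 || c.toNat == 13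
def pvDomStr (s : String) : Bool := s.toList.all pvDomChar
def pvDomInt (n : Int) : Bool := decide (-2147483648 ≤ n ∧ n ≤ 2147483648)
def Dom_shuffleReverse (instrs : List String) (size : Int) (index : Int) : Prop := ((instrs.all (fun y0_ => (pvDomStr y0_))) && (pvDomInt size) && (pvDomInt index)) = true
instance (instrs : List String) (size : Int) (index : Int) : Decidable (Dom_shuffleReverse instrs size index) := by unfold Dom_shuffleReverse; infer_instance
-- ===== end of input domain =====

-- B stages the work: it first parses the instructions into compact opcodes, then folds
-- the affine map forwards over the opcodes, reducing a, b modulo size at every step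
-- (A is one backwards string-matching loop with unreduced integers); objective: alternative.

-- Port of Python's three-argument pow(b, e, m): for e ≥ 0 it is PySem.Int.powMod;
-- for e < 0 Python first inverts b modulo m (ValueError when gcd(b, m) ≠ 1 — those
-- inputs are outside Pre_; the 0 returned there is never claimed about).
def pyPow3 (b e m : Int) : Int :=
  if 0 ≤ e then PySem.Int.powMod b e.toNat m
  else if Int.gcd b m = 1 then
    PySem.Int.powMod (PySem.Int.mod (Int.gcdA b m) m) (-e).toNat m
  else 0

-- ===== PORT A =====
def shuffleReverseStepA (size : Int) (st : Int × Int) (instr : String) : Int × Int :=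
  let a := st.1
  let b := st.2
  let instr_p := (PySem.Str.split? instr " ").getD []
  if instr = "deal into new stack" then (a * (-1), (b + 1) * (-1))
  else if instr_p.getD 0 "" = "cut" then
    let n := (PySem.Int.ofStr? (instr_p.getD 1 "")).getD 0
    (a, b + n)
  else if instr_p.getD 0 "" = "deal" then
    let incr := (PySem.Int.ofStr? (instr_p.getD 3 "")).getD 0
    let p := pyPow3 incr (size - 2) size
    (a * p, b * p)
  else (a, b)

def shuffleReverse (instrs : List String) (size : Int) (index : Int) : List Int :=
  let st := (instrs.reverse).foldl (shuffleReverseStepA size) (1, 0)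
  [PySem.Int.mod st.1 size, PySem.Int.mod st.2 size]

-- ===== PORT B =====
-- opcode produced by the parsing stage (Python's ('s',0) / ('c',n) / ('d',p) tuples)
inductive ShufOp : Type
  | stack : ShufOp
  | cut : Int → ShufOp
  | deal : Int → ShufOp
deriving DecidableEq, Repr

-- Python _parse: one instruction ↦ opcode, or None if it matches nothing
def parseOp (size : Int) (instr : String) : Option ShufOp :=
  let w := (PySem.Str.split? instr " ").getD []
  if instr = "deal into new stack" then some ShufOp.stack
  else if w.getD 0 "" = "cut" then
    some (ShufOp.cut ((PySem.Int.ofStr? (w.getD 1 "")).getD 0))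
  else if w.getD 0 "" = "deal" then
    some (ShufOp.deal (pyPow3 ((PySem.Int.ofStr? (w.getD 3 "")).getD 0) (size - 2) size))
  else none

-- one opcode applied to the reduced accumulator (a, b)
def applyOp (size : Int) (st : Int × Int) : ShufOp → Int × Int
  | ShufOp.stack => (PySem.Int.mod (-st.1) size, PySem.Int.mod (st.2 - st.1) size)
  | ShufOp.cut n => (st.1, PySem.Int.mod (st.2 + st.1 * n) size)
  | ShufOp.deal p => (PySem.Int.mod (st.1 * p) size, st.2)

def shuffleReverse_alt (instrs : List String) (size : Int) (index : Int) : List Int :=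
  let ops := instrs.filterMap (parseOp size)
  let st := ops.foldl (applyOp size) (1, 0)
  [PySem.Int.mod st.1 size, PySem.Int.mod st.2 size]

-- ===== PRECONDITION & SPEC =====
-- Pre_ excludes exactly the inputs where the Python A raises: size = 0 (ZeroDivisionError
-- from '%'), a 'cut'/'deal' instruction whose operand word is missing (IndexError) or not
-- an int literal (ValueError), and a 'deal …' instruction with size ≤ 1 and
-- gcd(incr, size) ≠ 1 (ValueError: pow with negative exponent, non-invertible base).
def PreInstr_shuffleReverse (size : Int) (instr : String) : Bool :=
  let instr_p := (PySem.Str.split? instr " ").getD []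
  if instr = "deal into new stack" then true
  else if instr_p.getD 0 "" = "cut" then
    decide (2 ≤ instr_p.length) && (PySem.Int.ofStr? (instr_p.getD 1 "")).isSome
  else if instr_p.getD 0 "" = "deal" then
    decide (4 ≤ instr_p.length) && (PySem.Int.ofStr? (instr_p.getD 3 "")).isSome &&
      (decide (0 ≤ size - 2) ||
        decide (Int.gcd ((PySem.Int.ofStr? (instr_p.getD 3 "")).getD 0) size = 1))
  else true

def Pre_shuffleReverse (instrs : List String) (size : Int) (index : Int) : Prop :=
  size ≠ 0 ∧ ∀ instr ∈ instrs, PreInstr_shuffleReverse size instr = true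

instance (instrs : List String) (size : Int) (index : Int) : Decidable (Pre_shuffleReverse instrs size index) := by
  unfold Pre_shuffleReverse; infer_instance

def pvWitness_shuffleReverse : List String × Int × Int :=
  (["deal into new stack", "cut -13", "deal with increment 7"], 23, 3)

def Spec_shuffleReverse (instrs : List String) (size : Int) (index : Int) (out : List Int) : Prop := out = shuffleReverse_alt instrs size index
instance (instrs : List String) (size : Int) (index : Int) (out : List Int) : Decidable (Spec_shuffleReverse instrs size index out) := by unfold Spec_shuffleReverse; infer_instance

-- ===== CLAIM (what is proved, stated in full; the proofs are below) =====
def Claim_equal_shuffleReverse : Prop := ∀ (instrs : List String) (size : Int) (index : Int), Dom_shuffleReverse instrs size index → Pre_shuffleReverse instrs size index → Spec_shuffleReverse instrs size index (shuffleReverse instrs size index)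

-- ===== LEMMAS AND PROOFS =====

-- composition of affine maps x ↦ f.1 * x + f.2: 'affComp f g' applies g first, then f
def affComp (f g : Int × Int) : Int × Int := (f.1 * g.1, f.1 * g.2 + f.2)

-- pointwise congruence mod m
def modEq2 (m : Int) (s t : Int × Int) : Prop :=
  s.1 ≡ t.1 [ZMOD m] ∧ s.2 ≡ t.2 [ZMOD m]

theorem modEq2_refl (m : Int) (s : Int × Int) : modEq2 m s s :=
  ⟨Int.ModEq.refl _, Int.ModEq.refl _⟩

theorem modEq2_trans {m : Int} {s t u : Int × Int} (h1 : modEq2 m s t) (h2 : modEq2 m t u) :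
    modEq2 m s u :=
  ⟨h1.1.trans h2.1, h1.2.trans h2.2⟩

theorem pymod_modEq (x m : Int) : PySem.Int.mod x m ≡ x [ZMOD m] := by
  have h := PySem.Int.floordiv_mul_add_mod x m
  exact Int.modEq_iff_dvd.mpr ⟨PySem.Int.floordiv x m, by linarith⟩

theorem pymod_eq_of_modEq {x y m : Int} (hm : m ≠ 0) (h : x ≡ y [ZMOD m]) :
    PySem.Int.mod x m = PySem.Int.mod y m := by
  have hmod : PySem.Int.mod x m ≡ PySem.Int.mod y m [ZMOD m] :=
    (pymod_modEq x m).trans (h.trans (pymod_modEq y m).symm)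
  have hdvd : m ∣ PySem.Int.mod y m - PySem.Int.mod x m := Int.ModEq.dvd hmod
  rcases lt_or_gt_of_ne hm with hneg | hpos
  · have b1 := PySem.Int.mod_neg_bounds x hneg
    have b2 := PySem.Int.mod_neg_bounds y hneg
    have hd : (-m) ∣ PySem.Int.mod y m - PySem.Int.mod x m := neg_dvd.mpr hdvd
    have := Int.eq_zero_of_abs_lt_dvd hd (by rw [abs_lt]; omega)
    omega
  · have b1l := PySem.Int.mod_nonneg x hpos
    have b1h := PySem.Int.mod_lt x hpos
    have b2l := PySem.Int.mod_nonneg y hpos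
    have b2h := PySem.Int.mod_lt y hpos
    have := Int.eq_zero_of_abs_lt_dvd hdvd (by rw [abs_lt]; omega)
    omega

theorem affComp_assoc (f g h : Int × Int) :
    affComp (affComp f g) h = affComp f (affComp g h) := by
  simp only [affComp, Prod.mk.injEq]; exact ⟨by ring, by ring⟩

theorem affComp_id_left (s : Int × Int) : affComp (1, 0) s = s := by
  simp [affComp]

theorem affComp_id_right (s : Int × Int) : affComp s (1, 0) = s := by
  simp [affComp]

theorem affComp_congr_left {m : Int} {s t : Int × Int} (g : Int × Int)
    (h : modEq2 m s t) : modEq2 m (affComp s g) (affComp t g) :=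
  ⟨h.1.mul_right _, (h.1.mul_right _).add h.2⟩

theorem stepA_eq_comp (size : Int) (st : Int × Int) (instr : String) :
    shuffleReverseStepA size st instr =
      affComp (shuffleReverseStepA size (1, 0) instr) st := by
  simp only [shuffleReverseStepA, affComp]
  split_ifs <;> simp only [Prod.mk.injEq] <;> exact ⟨by ring, by ring⟩

theorem modEq_of_eq {m x y : Int} (h : x = y) : x ≡ y [ZMOD m] := h ▸ Int.ModEq.refl _

theorem pymod_modEq' {x y : Int} (m : Int) (h : x = y) : PySem.Int.mod x m ≡ y [ZMOD m] :=
  h ▸ pymod_modEq x m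

-- B's combined per-instruction step: parse, then apply (identity on no match)
def stepB (size : Int) (st : Int × Int) (instr : String) : Int × Int :=
  match parseOp size instr with
  | none => st
  | some op => applyOp size st op

-- folding applyOp over the parsed opcode list is folding stepB over the strings
theorem foldl_parsed (size : Int) (l : List String) (s : Int × Int) :
    (l.filterMap (parseOp size)).foldl (applyOp size) s = l.foldl (stepB size) s := by
  induction l generalizing s with
  | nil => rfl
  | cons i t ih =>
      simp only [List.filterMap_cons, List.foldl_cons, stepB]
      cases parseOp size i with
      | none => exact ih s
      | some op => simpa using ih (applyOp size s op)

-- B's reduced step is congruent mod size to composing A's one-step map on the right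
theorem stepB_modEq_comp (size : Int) (st : Int × Int) (instr : String) :
    modEq2 size (stepB size st instr)
      (affComp st (shuffleReverseStepA size (1, 0) instr)) := by
  simp only [stepB, parseOp, shuffleReverseStepA, affComp, modEq2]
  split_ifs <;> simp only [applyOp] <;> refine ⟨?_, ?_⟩ <;>
    first
      | exact pymod_modEq' _ (by ring)
      | exact modEq_of_eq (by ring)

-- generic: a left fold that composes on the RIGHT factors out of the seed
theorem foldl_rightcomp (c : String → Int × Int) (l : List String) (s : Int × Int) :
    l.foldl (fun g i => affComp g (c i)) s =
      affComp s (l.foldl (fun g i => affComp g (c i)) (1, 0)) := by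
  induction l generalizing s with
  | nil => simp [affComp_id_right]
  | cons i t ih =>
      simp only [List.foldl_cons]
      rw [ih (affComp s (c i)), ih (affComp (1, 0) (c i)), affComp_id_left, affComp_assoc]

-- A's fold is the left-composing fold
theorem foldA_eq_leftcomp (size : Int) (l : List String) (s : Int × Int) :
    l.foldl (shuffleReverseStepA size) s =
      l.foldl (fun g i => affComp (shuffleReverseStepA size (1, 0) i) g) s := by
  induction l generalizing s with
  | nil => rfl
  | cons i t ih => simp only [List.foldl_cons, ← stepA_eq_comp, ih]

-- folding the reversed list composing on the left = folding forwards composing on the right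
theorem revFold_eq_fwdFold (size : Int) (l : List String) :
    l.reverse.foldl (fun g i => affComp (shuffleReverseStepA size (1, 0) i) g) (1, 0) =
      l.foldl (fun g i => affComp g (shuffleReverseStepA size (1, 0) i)) (1, 0) := by
  induction l with
  | nil => rfl
  | cons i t ih =>
      simp only [List.reverse_cons, List.foldl_append, List.foldl_cons, List.foldl_nil, ih]
      rw [foldl_rightcomp _ t (affComp (1, 0) (shuffleReverseStepA size (1, 0) i)),
        affComp_id_left]

-- B's reduced forward fold is congruent mod size to the unreduced right-composing fold
theorem foldB_modEq (size : Int) (l : List String) (s t : Int × Int)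
    (h : modEq2 size s t) :
    modEq2 size (l.foldl (stepB size) s)
      (l.foldl (fun g i => affComp g (shuffleReverseStepA size (1, 0) i)) t) := by
  induction l generalizing s t with
  | nil => exact h
  | cons i tl ih =>
      simp only [List.foldl_cons]
      exact ih _ _ (modEq2_trans (stepB_modEq_comp size s i) (affComp_congr_left _ h))

-- ===== VERDICT (by name: the statement is the Claim_ definition above) =====
theorem shuffleReverse_spec : Claim_equal_shuffleReverse := by
  intro instrs size index _hDom hPre
  obtain ⟨hsz, -⟩ := hPre
  have hA : instrs.reverse.foldl (shuffleReverseStepA size) (1, 0) =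
      instrs.foldl (fun g i => affComp g (shuffleReverseStepA size (1, 0) i)) (1, 0) := by
    rw [foldA_eq_leftcomp, revFold_eq_fwdFold]
  have hB := foldB_modEq size instrs (1, 0) (1, 0) (modEq2_refl _ _)
  have e1 := pymod_eq_of_modEq hsz hB.1
  have e2 := pymod_eq_of_modEq hsz hB.2
  simp only [Spec_shuffleReverse, shuffleReverse, shuffleReverse_alt, foldl_parsed]
  rw [hA, e1, e2]
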